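-- pv_equiv track=rewrite | github.com/Uber-Career-Prep-2023/Uber-Career-Prep-Homework-Anish-Banswada | Homework 3/VacationDestination.py | vacationDestination
-- ===== SOURCE A (Python) =====
-- def vacationDestination(connections, origin, time):
--     graph = {}
--     visited = {}
--     for connection in connections:
--         graph[connection[0]] = graph.get(connection[0],[]) + [(connection[1], connection[2])]
--         graph[connection[1]] = graph.get(connection[1],[]) + [(connection[0], connection[2])]
--         visited[connection[0]] = False
--         visited[connection[1]] = False
--     visited[origin] = True
--     res = []
--     for city in graph[origin]:
--         if time - city[1] >= 0:
--             dfs(graph, city, time - city[1] -1, res, visited)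
--     return res
--
-- def dfs(graph, origin, remaining_time, res, visited):
--     visited[origin[0]] = True
--     res.append(origin[0])
--     if remaining_time <= 0:
--         return
--     for city in graph[origin[0]]:
--         if not visited[city[0]] and remaining_time - city[1] >= 0:
--             dfs(graph, city, remaining_time - city[1] - 1, res, visited)
-- ===== SOURCE B (Python) =====
-- def vacationDestination(connections, origin, time):
--     graph = {}
--     for a, b, w in connections:
--         graph.setdefault(a, []).append((b, w))
--         graph.setdefault(b, []).append((a, w))
--     visited = {origin}
--     res = []
--     for nb, w0 in graph[origin]:
--         rt = time - w0
--         if rt < 0: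
--             continue
--         # visit the origin's neighbour unconditionally, then explicit-stack DFS
--         visited.add(nb)
--         res.append(nb)
--         stack = []
--         if rt - 1 > 0:
--             for c, cw in reversed(graph[nb]):
--                 if rt - 1 - cw >= 0:
--                     stack.append((c, rt - 1 - cw - 1))
--         while stack:
--             city, crt = stack.pop()
--             if city in visited:
--                 continue
--             visited.add(city)
--             res.append(city)
--             if crt > 0:
--                 for c, cw in reversed(graph[city]):
--                     if crt - cw >= 0:
--                         stack.append((c, crt - cw - 1))
--     return res
-- ===== Notes on version B (the rewrite author's own statement) =====
-- stated objective: alternative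
-- what changed: A's recursive DFS helper (mutating shared visited/res) is replaced by an explicit-stack iterative DFS: for each admissible neighbour of the origin the children are pushed in reverse adjacency order onto a stack and the visited check is performed at pop time, reproducing the recursion's traversal order without recursion.
import Mathlib
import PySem

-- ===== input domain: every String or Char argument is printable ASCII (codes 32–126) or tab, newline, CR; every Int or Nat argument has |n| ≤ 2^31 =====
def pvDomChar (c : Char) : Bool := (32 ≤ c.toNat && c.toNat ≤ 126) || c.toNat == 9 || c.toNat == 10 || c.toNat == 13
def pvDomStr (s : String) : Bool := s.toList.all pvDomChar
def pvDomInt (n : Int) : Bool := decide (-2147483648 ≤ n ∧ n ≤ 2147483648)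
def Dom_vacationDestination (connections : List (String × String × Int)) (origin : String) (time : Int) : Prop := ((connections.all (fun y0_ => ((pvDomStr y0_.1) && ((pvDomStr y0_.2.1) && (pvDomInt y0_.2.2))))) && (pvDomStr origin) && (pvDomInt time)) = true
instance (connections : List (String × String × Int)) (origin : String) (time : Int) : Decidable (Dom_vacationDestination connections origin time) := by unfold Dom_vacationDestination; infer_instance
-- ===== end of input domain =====

-- B re-implements A's recursive DFS as an explicit-stack iterative DFS (same traversal order,
-- visited checked at pop time); equal return value proved on Pre_ (origin an endpoint of some connection).

-- ===== PORT A =====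
def dfsA (gr : PySem.Dict String (List (String × Int))) :
    Nat → (String × Int) → Int → PySem.Dict String Bool → List String →
    PySem.Dict String Bool × List String
  | 0, _, _, visited, res => (visited, res)
  | fuel+1, origin, rt, visited, res =>
    let visited := visited.insert origin.1 true
    let res := res ++ [origin.1]
    if rt ≤ 0 then (visited, res)
    else
      (gr.getD origin.1 []).foldl
        (fun s city =>
          if s.1.getD city.1 false = false ∧ rt - city.2 ≥ 0 then
            dfsA gr fuel city (rt - city.2 - 1) s.1 s.2
          else s)
        (visited, res)

def vacationDestination (connections : List (String × String × Int)) (origin : String) (time : Int) : List String :=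
  let gv := connections.foldl
    (fun (gv : PySem.Dict String (List (String × Int)) × PySem.Dict String Bool) c =>
      ((gv.1.insert c.1 (gv.1.getD c.1 [] ++ [(c.2.1, c.2.2)])).insert c.2.1
          ((gv.1.insert c.1 (gv.1.getD c.1 [] ++ [(c.2.1, c.2.2)])).getD c.2.1 [] ++ [(c.1, c.2.2)]),
       (gv.2.insert c.1 false).insert c.2.1 false))
    (PySem.Dict.empty, PySem.Dict.empty)
  let visited := gv.2.insert origin true
  ((gv.1.getD origin []).foldl
    (fun (s : PySem.Dict String Bool × List String) city =>
      if time - city.2 ≥ 0 then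
        dfsA gv.1 (2 * connections.length + 2) city (time - city.2 - 1) s.1 s.2
      else s)
    (visited, [])).2

-- ===== PORT B helpers for termination =====
def unvisB (gr : PySem.Dict String (List (String × Int))) (v : PySem.Set String) : Nat :=
  (gr.keys.filter (fun k => !(PySem.Set.contains v k))).length

theorem pvFilterLe {α : Type} {l : List α} {p q : α → Bool}
    (himp : ∀ x, q x = true → p x = true) :
    (l.filter q).length ≤ (l.filter p).length := by
  induction l with
  | nil => simp
  | cons a t ih =>
    simp only [List.filter_cons]
    cases hq : q a
    · cases hp : p a
      · exact ih
      · exact Nat.le_succ_of_le ih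
    · rw [himp a hq]; exact Nat.succ_le_succ ih

theorem pvFilterLt {α : Type} {l : List α} {p q : α → Bool}
    (himp : ∀ x, q x = true → p x = true) {c : α} (hc : c ∈ l)
    (hp : p c = true) (hq : q c = false) :
    (l.filter q).length < (l.filter p).length := by
  induction l with
  | nil => cases hc
  | cons a t ih =>
    rcases List.mem_cons.1 hc with rfl | hc'
    · simp only [List.filter_cons, hp, hq]
      exact Nat.lt_succ_of_le (pvFilterLe himp)
    · simp only [List.filter_cons]
      cases hqa : q a
      · cases hpa : p a
        · exact ih hc'
        · exact Nat.lt_succ_of_lt (ih hc')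
      · rw [himp a hqa]; exact Nat.succ_lt_succ (ih hc')

theorem set_contains_iff (v : PySem.Set String) (x : String) :
    PySem.Set.contains v x = true ↔ x ∈ v := by
  simp [PySem.Set.contains, List.contains_eq_mem]

theorem unvis_add_lt (gr : PySem.Dict String (List (String × Int))) {v : PySem.Set String} {c : String}
    (hk : c ∈ gr.keys) (hc : PySem.Set.contains v c = false) :
    unvisB gr (PySem.Set.add v c) < unvisB gr v := by
  apply pvFilterLt (c := c) _ hk
  · rw [hc]; rfl
  · rw [Bool.not_eq_false', set_contains_iff]
    exact (PySem.Set.mem_add _ _ _).2 (Or.inr rfl)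
  · intro x hx
    rw [Bool.not_eq_true', Bool.eq_false_iff, Ne, set_contains_iff] at hx
    rw [Bool.not_eq_true', Bool.eq_false_iff, Ne, set_contains_iff]
    intro hvx
    exact hx ((PySem.Set.mem_add _ _ _).2 (Or.inl hvx))

theorem unvis_add_eq_of_not_mem (gr : PySem.Dict String (List (String × Int))) {v : PySem.Set String} {c : String}
    (hk : ¬ c ∈ gr.keys) : unvisB gr (PySem.Set.add v c) = unvisB gr v := by
  unfold unvisB
  congr 1
  apply List.filter_congr
  intro x hx
  have hxc : x ≠ c := fun h => hk (h ▸ hx)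
  congr 1
  cases hvx : PySem.Set.contains v x
  · rw [Bool.eq_false_iff]
    intro hcon
    rw [set_contains_iff] at hcon
    rcases (PySem.Set.mem_add _ _ _).1 hcon with hmem | rfl
    · rw [Bool.eq_false_iff, Ne, set_contains_iff] at hvx; exact hvx hmem
    · exact hxc rfl
  · rw [set_contains_iff] at hvx ⊢
    exact (PySem.Set.mem_add _ _ _).2 (Or.inl hvx)

theorem getD_nil_of_not_mem_keys (gr : PySem.Dict String (List (String × Int))) {c : String}
    (hk : ¬ c ∈ gr.keys) : gr.getD c [] = [] := by
  apply PySem.Dict.getD_of_not_contains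
  cases h : gr.contains c
  · rfl
  · exact absurd ((PySem.Dict.contains_iff_mem_keys _ _).1 h) hk

-- ===== PORT B =====
def buildG (connections : List (String × String × Int)) : PySem.Dict String (List (String × Int)) :=
  connections.foldl
    (fun g c => (g.modify c.1 [] (· ++ [(c.2.1, c.2.2)])).modify c.2.1 [] (· ++ [(c.1, c.2.2)]))
    PySem.Dict.empty

def loopB (gr : PySem.Dict String (List (String × Int))) :
    List (String × Int) → PySem.Set String → List String → PySem.Set String × List String
  | [], v, r => (v, r)
  | (c, rt) :: stack, v, r =>
    if PySem.Set.contains v c then loopB gr stack v r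
    else
      loopB gr
        (if rt > 0 then
           (gr.getD c []).reverse.foldl
             (fun st p => if rt - p.2 ≥ 0 then (p.1, rt - p.2 - 1) :: st else st) stack
         else stack)
        (PySem.Set.add v c) (r ++ [c])
termination_by stack v _ => (unvisB gr v, stack.length)
decreasing_by
  · exact Prod.Lex.right _ (Nat.lt_succ_self _)
  · by_cases hk : c ∈ gr.keys
    · exact Prod.Lex.left _ _ (unvis_add_lt gr hk (by simp_all))
    · rw [getD_nil_of_not_mem_keys gr hk, unvis_add_eq_of_not_mem gr hk]
      refine Prod.Lex.right _ ?_
      simp only [List.reverse_nil, List.foldl_nil, List.length_cons]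
      split <;> exact Nat.lt_succ_self _

def vacationDestination_alt (connections : List (String × String × Int)) (origin : String) (time : Int) : List String :=
  let gr := buildG connections
  ((gr.getD origin []).foldl
    (fun (s : PySem.Set String × List String) nb =>
      if time - nb.2 < 0 then s
      else
        loopB gr
          (if time - nb.2 - 1 > 0 then
             (gr.getD nb.1 []).reverse.foldl
               (fun st p =>
                 if time - nb.2 - 1 - p.2 ≥ 0 then (p.1, time - nb.2 - 1 - p.2 - 1) :: st else st) []
           else [])
          (PySem.Set.add s.1 nb.1) (s.2 ++ [nb.1]))
    (PySem.Set.add PySem.Set.empty origin, [])).2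

-- ===== PRECONDITION & SPEC =====
-- Pre_ excludes exactly the inputs where the Python A raises KeyError on graph[origin]
-- (origin not an endpoint of any connection); A returns on every other input.
def Pre_vacationDestination (connections : List (String × String × Int)) (origin : String) (time : Int) : Prop :=
  ∃ c ∈ connections, origin = c.1 ∨ origin = c.2.1
instance (connections : List (String × String × Int)) (origin : String) (time : Int) : Decidable (Pre_vacationDestination connections origin time) := by unfold Pre_vacationDestination; infer_instance

def pvWitness_vacationDestination : (List (String × String × Int)) × String × Int := ([("a", "b", 3)], "a", 5)

def Spec_vacationDestination (connections : List (String × String × Int)) (origin : String) (time : Int) (out : List String) : Prop := out = vacationDestination_alt connections origin time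
instance (connections : List (String × String × Int)) (origin : String) (time : Int) (out : List String) : Decidable (Spec_vacationDestination connections origin time out) := by unfold Spec_vacationDestination; infer_instance

-- ===== CLAIM (what is proved, stated in full; the proofs are below) =====
def Claim_equal_vacationDestination : Prop := ∀ (connections : List (String × String × Int)) (origin : String) (time : Int), Dom_vacationDestination connections origin time → Pre_vacationDestination connections origin time → Spec_vacationDestination connections origin time (vacationDestination connections origin time)

-- ===== LEMMAS AND PROOFS =====

-- generic fold congruence under an invariant
theorem pvFoldlCong {σ α : Type} (P : σ → Prop) (f g : σ → α → σ) (l : List α) (s : σ)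
    (hs : P s) (h : ∀ s x, x ∈ l → P s → f s x = g s x ∧ P (f s x)) :
    l.foldl f s = l.foldl g s := by
  induction l generalizing s with
  | nil => rfl
  | cons a t ih =>
    have ha := h s a (List.mem_cons_self) hs
    simp only [List.foldl_cons]
    rw [← ha.1]
    exact ih (f s a) ha.2 (fun s x hx hP => h s x (List.mem_cons_of_mem _ hx) hP)

-- generic fold invariant preservation
theorem pvFoldlInv {σ α : Type} (P : σ → Prop) (f : σ → α → σ) (l : List α) (s : σ)
    (hs : P s) (h : ∀ s x, P s → P (f s x)) : P (l.foldl f s) := by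
  induction l generalizing s with
  | nil => exact hs
  | cons a t ih => exact ih (f s a) (h s a hs)

def muA (v : PySem.Dict String Bool) : Nat :=
  (v.keys.filter (fun k => !(v.getD k false))).length

def RelV (vA : PySem.Dict String Bool) (vB : PySem.Set String) : Prop :=
  ∀ x, vA.getD x false = PySem.Set.contains vB x

def GoodG (gr : PySem.Dict String (List (String × Int))) : Prop :=
  ∀ c p, p ∈ gr.getD c [] → gr.contains p.1 = true

def PostV (v w : PySem.Dict String Bool) : Prop :=
  (∀ x, v.getD x false = true → w.getD x false = true) ∧
  (∀ x, v.contains x = true → w.contains x = true) ∧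
  muA w ≤ muA v ∧ (v.keys.Nodup → w.keys.Nodup)

theorem postV_refl (v : PySem.Dict String Bool) : PostV v v :=
  ⟨fun _ h => h, fun _ h => h, le_refl _, fun h => h⟩

theorem postV_trans {u v w : PySem.Dict String Bool} (h1 : PostV u v) (h2 : PostV v w) : PostV u w :=
  ⟨fun x hx => h2.1 x (h1.1 x hx), fun x hx => h2.2.1 x (h1.2.1 x hx),
   le_trans h2.2.2.1 h1.2.2.1, fun h => h2.2.2.2 (h1.2.2.2 h)⟩

theorem muA_insert_true_le (v : PySem.Dict String Bool) (k : String) :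
    muA (v.insert k true) ≤ muA v := by
  have himp : ∀ x, (!((v.insert k true).getD x false)) = true → (!(v.getD x false)) = true := by
    intro x hx
    rw [PySem.Dict.getD_insert] at hx
    by_cases hxk : x = k
    · simp [hxk] at hx
    · rwa [if_neg hxk] at hx
  unfold muA
  by_cases hc : v.contains k = true
  · rw [PySem.Dict.keys_insert_of_contains _ _ hc]
    exact pvFilterLe himp
  · rw [PySem.Dict.keys_insert_of_not_contains _ _ (by simpa using hc)]
    rw [List.filter_append]
    have : List.filter (fun x => !((v.insert k true).getD x false)) [k] = [] := by
      simp [PySem.Dict.getD_insert]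
    rw [this, List.append_nil]
    exact pvFilterLe himp

theorem muA_insert_true_lt {v : PySem.Dict String Bool} {k : String}
    (hin : v.contains k = true) (hf : v.getD k false = false) :
    muA (v.insert k true) < muA v := by
  unfold muA
  rw [PySem.Dict.keys_insert_of_contains _ _ hin]
  apply pvFilterLt (c := k)
  · intro x hx
    rw [Bool.not_eq_true'] at hx ⊢
    rw [PySem.Dict.getD_insert] at hx
    by_cases hxk : x = k
    · simp [hxk] at hx
    · rwa [if_neg hxk] at hx
  · exact (PySem.Dict.contains_iff_mem_keys _ _).1 hin
  · simp [hf]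
  · simp

theorem muA_pos {v : PySem.Dict String Bool} {k : String}
    (hin : v.contains k = true) (hf : v.getD k false = false) : 1 ≤ muA v := by
  have hk : k ∈ v.keys.filter (fun x => !(v.getD x false)) := by
    rw [List.mem_filter]
    exact ⟨(PySem.Dict.contains_iff_mem_keys _ _).1 hin, by simp [hf]⟩
  have := List.length_pos_of_mem hk
  unfold muA
  omega

theorem postV_insert_true (v : PySem.Dict String Bool) (k : String) :
    PostV v (v.insert k true) := by
  refine ⟨?_, ?_, muA_insert_true_le v k, ?_⟩
  · intro x hx
    rw [PySem.Dict.getD_insert]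
    by_cases hxk : x = k
    · simp [hxk]
    · rwa [if_neg hxk]
  · intro x hx
    rw [PySem.Dict.contains_insert]
    simp [hx]
  · intro hnd
    by_cases hc : v.contains k = true
    · rwa [PySem.Dict.keys_insert_of_contains _ _ hc]
    · rw [PySem.Dict.keys_insert_of_not_contains _ _ (by simpa using hc)]
      rw [List.nodup_append]
      refine ⟨hnd, List.nodup_singleton _, ?_⟩
      intro a ha b hb
      rw [List.mem_singleton] at hb
      subst hb
      intro h
      subst h
      have : v.contains a = true := (PySem.Dict.contains_iff_mem_keys _ _).2 ha
      exact hc this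

theorem contains_add_eq (v : PySem.Set String) (c x : String) :
    PySem.Set.contains (PySem.Set.add v c) x = (PySem.Set.contains v x || decide (x = c)) := by
  rw [Bool.eq_iff_iff]
  simp only [Bool.or_eq_true, decide_eq_true_eq, set_contains_iff]
  constructor
  · intro h; exact (PySem.Set.mem_add _ _ _).1 h
  · intro h; exact (PySem.Set.mem_add _ _ _).2 h

theorem relV_insert_add {vA : PySem.Dict String Bool} {vB : PySem.Set String}
    (h : RelV vA vB) (c : String) : RelV (vA.insert c true) (PySem.Set.add vB c) := by
  intro x
  rw [PySem.Dict.getD_insert, contains_add_eq]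
  by_cases hxc : x = c
  · simp [hxc]
  · simp [hxc, h x]
theorem dfsA_post (gr : PySem.Dict String (List (String × Int))) :
    ∀ (f : Nat) (o : String × Int) (rt : Int) (v : PySem.Dict String Bool) (r : List String),
      PostV v (dfsA gr f o rt v r).1 := by
  intro f
  induction f with
  | zero => intro o rt v r; exact postV_refl v
  | succ f ih =>
    intro o rt v r
    simp only [dfsA]
    split
    · exact postV_insert_true v o.1
    · refine postV_trans (postV_insert_true v o.1) ?_
      refine pvFoldlInv (fun (s : PySem.Dict String Bool × List String) => PostV (v.insert o.1 true) s.1)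
        _ (gr.getD o.1 []) (v.insert o.1 true, r ++ [o.1]) (postV_refl _) ?_
      intro s city hs
      split
      · exact postV_trans hs (ih city _ s.1 s.2)
      · exact hs

theorem dfsA_irr {gr : PySem.Dict String (List (String × Int))} (hG : GoodG gr) :
    ∀ (f f' : Nat) (o : String × Int) (rt : Int) (v : PySem.Dict String Bool) (r : List String),
      gr.contains o.1 = true → v.keys.Nodup →
      (∀ x, gr.contains x = true → v.contains x = true) →
      muA v + (if v.getD o.1 false = true then 1 else 0) ≤ f →
      muA v + (if v.getD o.1 false = true then 1 else 0) ≤ f' →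
      dfsA gr f o rt v r = dfsA gr f' o rt v r := by
  intro f
  induction f with
  | zero =>
    intro f' o rt v r ho hnd hk hf hf'
    exfalso
    by_cases hvo : v.getD o.1 false = true
    · rw [if_pos hvo] at hf; omega
    · rw [if_neg hvo] at hf
      have := muA_pos (hk o.1 ho) (by simpa using hvo)
      omega
  | succ f ih =>
    intro f' o rt v r ho hnd hk hf hf'
    cases f' with
    | zero =>
      exfalso
      by_cases hvo : v.getD o.1 false = true
      · rw [if_pos hvo] at hf'; omega
      · rw [if_neg hvo] at hf'
        have := muA_pos (hk o.1 ho) (by simpa using hvo)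
        omega
    | succ f₀' =>
      simp only [dfsA]
      split
      · rfl
      · apply pvFoldlCong (fun (s : PySem.Dict String Bool × List String) => PostV (v.insert o.1 true) s.1)
        · exact postV_refl _
        · intro s city hmem hs
          have hnd' : s.1.keys.Nodup := hs.2.2.2 ((postV_insert_true v o.1).2.2.2 hnd)
          have hk' : ∀ x, gr.contains x = true → s.1.contains x = true :=
            fun x hx => hs.2.1 x ((postV_insert_true v o.1).2.1 x (hk x hx))
          have hmu : muA s.1 ≤ muA (v.insert o.1 true) := hs.2.2.1
          have hbound : muA (v.insert o.1 true) + 1 ≤ f + 1 ∧ muA (v.insert o.1 true) + 1 ≤ f₀' + 1 := by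
            by_cases hvo : v.getD o.1 false = true
            · rw [if_pos hvo] at hf hf'
              have := muA_insert_true_le v o.1
              omega
            · rw [if_neg hvo] at hf hf'
              have := muA_insert_true_lt (hk o.1 ho) (by simpa using hvo)
              omega
          constructor
          · split
            case isTrue h =>
              refine ih f₀' city _ s.1 s.2 (hG o.1 city hmem) hnd' hk' ?_ ?_
              · rw [if_neg (by simp [h.1])]; omega
              · rw [if_neg (by simp [h.1])]; omega
            case isFalse h => rfl
          · split
            · exact postV_trans hs (dfsA_post gr f city _ s.1 s.2)
            · exact hs

def framesA (rt : Int) (adj : List (String × Int)) : List ((String × Int) × Int) :=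
  if rt ≤ 0 then []
  else adj.filterMap (fun c => if rt - c.2 ≥ 0 then some (c, rt - c.2 - 1) else none)

def stepA (gr : PySem.Dict String (List (String × Int))) (f : Nat)
    (s : PySem.Dict String Bool × List String) (fr : (String × Int) × Int) :
    PySem.Dict String Bool × List String :=
  if s.1.getD fr.1.1 false = false then dfsA gr f fr.1 fr.2 s.1 s.2 else s

theorem dfsA_unfold_frames (gr : PySem.Dict String (List (String × Int)))
    (f₀ : Nat) (o : String × Int) (rt : Int) (v : PySem.Dict String Bool) (r : List String) :
    dfsA gr (f₀+1) o rt v r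
      = (framesA rt (gr.getD o.1 [])).foldl (stepA gr f₀) (v.insert o.1 true, r ++ [o.1]) := by
  simp only [dfsA, framesA]
  split
  · rfl
  · generalize (gr.getD o.1 []) = adj
    generalize (v.insert o.1 true, r ++ [o.1]) = s
    induction adj generalizing s with
    | nil => rfl
    | cons c t ihc =>
      simp only [List.foldl_cons, List.filterMap_cons]
      by_cases hge : rt - c.2 ≥ 0
      · rw [if_pos hge, List.foldl_cons]
        have hstep : (if (s.1.getD c.1 false = false ∧ rt - c.2 ≥ 0) then
              dfsA gr f₀ c (rt - c.2 - 1) s.1 s.2 else s) = stepA gr f₀ s (c, rt - c.2 - 1) := by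
          unfold stepA
          by_cases hg : s.1.getD c.1 false = false
          · rw [if_pos ⟨hg, hge⟩, if_pos hg]
          · rw [if_neg (fun h => hg h.1), if_neg hg]
        rw [hstep]
        exact ihc _
      · rw [if_neg hge, if_neg (fun h => hge h.2)]
        exact ihc s

theorem mem_framesA {rt : Int} {adj : List (String × Int)} {fr : (String × Int) × Int}
    (h : fr ∈ framesA rt adj) : fr.1 ∈ adj := by
  unfold framesA at h
  split at h
  · cases h
  · rcases List.mem_filterMap.1 h with ⟨c, hc, hsome⟩
    split at hsome
    · cases hsome; exact hc
    · cases hsome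

theorem frames_fold_fuel {gr : PySem.Dict String (List (String × Int))} (hG : GoodG gr)
    (f f' : Nat) (frs : List ((String × Int) × Int)) (s : PySem.Dict String Bool × List String)
    (hfr : ∀ fr ∈ frs, gr.contains fr.1.1 = true) (hnd : s.1.keys.Nodup)
    (hk : ∀ x, gr.contains x = true → s.1.contains x = true)
    (hf : muA s.1 ≤ f) (hf' : muA s.1 ≤ f') :
    frs.foldl (stepA gr f) s = frs.foldl (stepA gr f') s := by
  apply pvFoldlCong (fun (t : PySem.Dict String Bool × List String) => PostV s.1 t.1)
  · exact postV_refl _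
  · intro t fr hmem ht
    constructor
    · unfold stepA
      split
      case isTrue h =>
        refine dfsA_irr hG f f' fr.1 fr.2 t.1 t.2 (hfr fr hmem)
          (ht.2.2.2 hnd) (fun x hx => ht.2.1 x (hk x hx)) ?_ ?_
        · rw [if_neg (by simp [h])]
          have := ht.2.2.1; omega
        · rw [if_neg (by simp [h])]
          have := ht.2.2.1; omega
      case isFalse h => rfl
    · unfold stepA
      split
      · exact postV_trans ht (dfsA_post gr f fr.1 fr.2 t.1 t.2)
      · exact ht

theorem frames_fold_post (gr : PySem.Dict String (List (String × Int))) (f : Nat)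
    (frs : List ((String × Int) × Int)) (s : PySem.Dict String Bool × List String) :
    PostV s.1 (frs.foldl (stepA gr f) s).1 := by
  refine pvFoldlInv (fun (t : PySem.Dict String Bool × List String) => PostV s.1 t.1)
    _ frs s (postV_refl _) ?_
  intro t fr ht
  unfold stepA
  split
  · exact postV_trans ht (dfsA_post gr f fr.1 fr.2 t.1 t.2)
  · exact ht

theorem pushfold_eq (rt : Int) (adj : List (String × Int)) (st0 : List (String × Int)) :
    adj.reverse.foldl (fun st p => if rt - p.2 ≥ 0 then (p.1, rt - p.2 - 1) :: st else st) st0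
      = adj.filterMap (fun p => if rt - p.2 ≥ 0 then some (p.1, rt - p.2 - 1) else none) ++ st0 := by
  rw [List.foldl_reverse]
  induction adj with
  | nil => rfl
  | cons c t ihc =>
    simp only [List.foldr_cons, List.filterMap_cons, ihc]
    by_cases hge : rt - c.2 ≥ 0
    · rw [if_pos hge, if_pos hge]; rfl
    · rw [if_neg hge, if_neg hge]
theorem loopB_nil (gr : PySem.Dict String (List (String × Int))) (v : PySem.Set String) (r : List String) :
    loopB gr [] v r = (v, r) := by
  rw [loopB]

theorem loopB_cons (gr : PySem.Dict String (List (String × Int))) (c : String) (rt : Int)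
    (stack : List (String × Int)) (v : PySem.Set String) (r : List String) :
    loopB gr ((c, rt) :: stack) v r =
      if PySem.Set.contains v c then loopB gr stack v r
      else
        loopB gr
          (if rt > 0 then
             (gr.getD c []).reverse.foldl
               (fun st p => if rt - p.2 ≥ 0 then (p.1, rt - p.2 - 1) :: st else st) stack
           else stack)
          (PySem.Set.add v c) (r ++ [c]) := by
  rw [loopB]

theorem loopB_eq_stepA {gr : PySem.Dict String (List (String × Int))} (hG : GoodG gr) :
    ∀ (n : Nat) (frs : List ((String × Int) × Int)) (vA : PySem.Dict String Bool)
      (vB : PySem.Set String) (r : List String) (f : Nat),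
      unvisB gr vB ≤ n → RelV vA vB → vA.keys.Nodup →
      (∀ x, gr.contains x = true → vA.contains x = true) →
      (∀ fr ∈ frs, gr.contains fr.1.1 = true) →
      muA vA + 1 ≤ f →
      RelV (frs.foldl (stepA gr f) (vA, r)).1 (loopB gr (frs.map (fun fr => (fr.1.1, fr.2))) vB r).1 ∧
      (loopB gr (frs.map (fun fr => (fr.1.1, fr.2))) vB r).2 = (frs.foldl (stepA gr f) (vA, r)).2 := by
  intro n
  induction n using Nat.strong_induction_on with
  | _ n ihn =>
  intro frs
  induction frs with
  | nil =>
    intro vA vB r f _ hrel _ _ _ _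
    simp only [List.map_nil, List.foldl_nil, loopB_nil]
    exact ⟨hrel, trivial⟩
  | cons fr rest ihr =>
    intro vA vB r f hn hrel hnd hk hfr hf
    simp only [List.map_cons, List.foldl_cons, loopB_cons]
    by_cases hv : PySem.Set.contains vB fr.1.1 = true
    · rw [if_pos hv]
      have hstep : stepA gr f (vA, r) fr = (vA, r) := by
        unfold stepA
        rw [if_neg (by rw [hrel fr.1.1, hv]; simp)]
      rw [hstep]
      exact ihr vA vB r f hn hrel hnd hk (fun x hx => hfr x (List.mem_cons_of_mem _ hx)) hf
    · rw [if_neg hv]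
      have hvb : PySem.Set.contains vB fr.1.1 = false := by simpa using hv
      have hgc : gr.contains fr.1.1 = true := hfr fr List.mem_cons_self
      have hcA : vA.contains fr.1.1 = true := hk _ hgc
      have hgdA : vA.getD fr.1.1 false = false := by rw [hrel fr.1.1, hvb]
      -- A side: one stepA application unfolds to a fold over the child frames
      obtain ⟨f₀, rfl⟩ : ∃ f₀, f = f₀ + 1 := ⟨f - 1, by omega⟩
      have hstep : stepA gr (f₀+1) (vA, r) fr
          = (framesA fr.2 (gr.getD fr.1.1 [])).foldl (stepA gr f₀)
              (vA.insert fr.1.1 true, r ++ [fr.1.1]) := by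
        unfold stepA
        rw [if_pos hgdA]
        exact dfsA_unfold_frames gr f₀ fr.1 fr.2 vA r
      have hmu' : muA (vA.insert fr.1.1 true) < muA vA := muA_insert_true_lt hcA hgdA
      have hfuel : (framesA fr.2 (gr.getD fr.1.1 [])).foldl (stepA gr f₀)
              (vA.insert fr.1.1 true, r ++ [fr.1.1])
          = (framesA fr.2 (gr.getD fr.1.1 [])).foldl (stepA gr (f₀+1))
              (vA.insert fr.1.1 true, r ++ [fr.1.1]) := by
        refine frames_fold_fuel hG f₀ (f₀+1) _ _
          (fun fr' hm => hG fr.1.1 fr'.1 (mem_framesA hm)) ?_ ?_ ?_ ?_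
        · exact (postV_insert_true vA fr.1.1).2.2.2 hnd
        · exact fun x hx => (postV_insert_true vA fr.1.1).2.1 x (hk x hx)
        · show muA (vA.insert fr.1.1 true) ≤ f₀
          omega
        · show muA (vA.insert fr.1.1 true) ≤ f₀ + 1
          omega
      -- B side: the pushed stack is exactly the mapped child frames
      have hstack : (if fr.2 > 0 then
             (gr.getD fr.1.1 []).reverse.foldl
               (fun st p => if fr.2 - p.2 ≥ 0 then (p.1, fr.2 - p.2 - 1) :: st else st)
               (rest.map (fun fr => (fr.1.1, fr.2)))
           else rest.map (fun fr => (fr.1.1, fr.2)))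
          = (framesA fr.2 (gr.getD fr.1.1 []) ++ rest).map (fun fr => (fr.1.1, fr.2)) := by
        rw [List.map_append]
        unfold framesA
        by_cases hrt : fr.2 ≤ 0
        · rw [if_neg (by omega), if_pos hrt]
          simp
        · rw [if_pos (by omega), if_neg hrt, pushfold_eq]
          congr 1
          rw [List.map_filterMap]
          apply List.filterMap_congr
          intro p _
          by_cases hge : fr.2 - p.2 ≥ 0
          · rw [if_pos hge, if_pos hge]; rfl
          · rw [if_neg hge, if_neg hge]; rfl
      rw [hstep, hfuel, hstack, ← List.foldl_append]
      have hlt : unvisB gr (PySem.Set.add vB fr.1.1) < n :=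
        Nat.lt_of_lt_of_le (unvis_add_lt gr ((PySem.Dict.contains_iff_mem_keys _ _).1 hgc) hvb) hn
      refine ihn (unvisB gr (PySem.Set.add vB fr.1.1)) hlt (framesA fr.2 (gr.getD fr.1.1 []) ++ rest)
        (vA.insert fr.1.1 true) (PySem.Set.add vB fr.1.1) (r ++ [fr.1.1]) (f₀+1)
        (le_refl _) (relV_insert_add hrel fr.1.1)
        ((postV_insert_true vA fr.1.1).2.2.2 hnd)
        (fun x hx => (postV_insert_true vA fr.1.1).2.1 x (hk x hx)) ?_ (by omega)
      intro fr' hm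
      rcases List.mem_append.1 hm with hm | hm
      · exact hG fr.1.1 fr'.1 (mem_framesA hm)
      · exact hfr fr' (List.mem_cons_of_mem _ hm)
def buildVis (connections : List (String × String × Int)) : PySem.Dict String Bool :=
  connections.foldl (fun v c => (v.insert c.1 false).insert c.2.1 false) PySem.Dict.empty

theorem keys_nodup_insert {κ ν : Type} [BEq κ] [LawfulBEq κ] (d : PySem.Dict κ ν) (k : κ) (b : ν)
    (hnd : d.keys.Nodup) : (d.insert k b).keys.Nodup := by
  by_cases hc : d.contains k = true
  · rwa [PySem.Dict.keys_insert_of_contains _ _ hc]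
  · rw [PySem.Dict.keys_insert_of_not_contains _ _ (by simpa using hc)]
    rw [List.nodup_append]
    refine ⟨hnd, List.nodup_singleton _, ?_⟩
    intro a ha b' hb'
    rw [List.mem_singleton] at hb'
    subst hb'
    intro h
    subst h
    exact hc ((PySem.Dict.contains_iff_mem_keys _ _).2 ha)

theorem keys_len_insert {κ ν : Type} [BEq κ] (d : PySem.Dict κ ν) (k : κ) (b : ν) :
    (d.insert k b).keys.length ≤ d.keys.length + 1 := by
  by_cases hc : d.contains k = true
  · simp only [PySem.Dict.insert, if_pos hc, PySem.Dict.keys, List.length_map]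
    simp
  · simp only [PySem.Dict.insert, if_neg hc, PySem.Dict.keys, List.length_map]
    simp

theorem buildVis_getD (connections : List (String × String × Int)) (x : String) :
    (buildVis connections).getD x false = false := by
  unfold buildVis
  refine pvFoldlInv (fun (v : PySem.Dict String Bool) => ∀ y, v.getD y false = false)
    _ connections PySem.Dict.empty (fun y => by simp [pysem]) ?_ x
  intro v c hv y
  rw [PySem.Dict.getD_insert, PySem.Dict.getD_insert]
  split
  · rfl
  · split
    · rfl
    · exact hv y

theorem buildVis_nodup (connections : List (String × String × Int)) :
    (buildVis connections).keys.Nodup := by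
  unfold buildVis
  refine pvFoldlInv (fun (v : PySem.Dict String Bool) => v.keys.Nodup)
    _ connections PySem.Dict.empty (by simp [pysem]) ?_
  intro v c hv
  exact keys_nodup_insert _ _ _ (keys_nodup_insert _ _ _ hv)

theorem buildVis_keys_len (connections : List (String × String × Int)) :
    (buildVis connections).keys.length ≤ 2 * connections.length := by
  unfold buildVis
  suffices h : ∀ (l : List (String × String × Int)) (v : PySem.Dict String Bool),
      (l.foldl (fun v c => (v.insert c.1 false).insert c.2.1 false) v).keys.length
        ≤ v.keys.length + 2 * l.length by
    have := h connections PySem.Dict.empty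
    simpa [pysem] using this
  intro l
  induction l with
  | nil => intro v; simp
  | cons c t ih =>
    intro v
    simp only [List.foldl_cons, List.length_cons]
    calc ((t.foldl (fun v c => (v.insert c.1 false).insert c.2.1 false)
            ((v.insert c.1 false).insert c.2.1 false)).keys.length)
        ≤ ((v.insert c.1 false).insert c.2.1 false).keys.length + 2 * t.length := ih _
      _ ≤ (v.keys.length + 1 + 1) + 2 * t.length := by
          have h1 := keys_len_insert (v.insert c.1 false) c.2.1 false
          have h2 := keys_len_insert v c.1 false
          omega
      _ ≤ v.keys.length + 2 * (t.length + 1) := by omega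

theorem muA_le_keys (v : PySem.Dict String Bool) : muA v ≤ v.keys.length :=
  List.length_filter_le _ _

theorem contains_buildG_eq_buildVis (connections : List (String × String × Int)) (x : String) :
    (buildG connections).contains x = (buildVis connections).contains x := by
  unfold buildG buildVis
  suffices h : ∀ (l : List (String × String × Int)) (g : PySem.Dict String (List (String × Int)))
      (v : PySem.Dict String Bool), g.contains x = v.contains x →
      (l.foldl (fun g c => (g.modify c.1 [] (· ++ [(c.2.1, c.2.2)])).modify c.2.1 [] (· ++ [(c.1, c.2.2)])) g).contains x
        = (l.foldl (fun v c => (v.insert c.1 false).insert c.2.1 false) v).contains x by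
    exact h connections PySem.Dict.empty PySem.Dict.empty (by simp [pysem])
  intro l
  induction l with
  | nil => intro g v h; exact h
  | cons c t ih =>
    intro g v h
    simp only [List.foldl_cons]
    apply ih
    simp only [PySem.Dict.modify, PySem.Dict.contains_insert, h]

theorem goodG_buildG (connections : List (String × String × Int)) :
    GoodG (buildG connections) := by
  unfold buildG
  refine pvFoldlInv GoodG _ connections PySem.Dict.empty ?_ ?_
  · intro c p hp
    simp [pysem] at hp
  · intro g c hP c' p hp
    simp only [PySem.Dict.modify] at hp ⊢
    have hmem : p = (c.1, c.2.2) ∨ p = (c.2.1, c.2.2) ∨ ∃ y, p ∈ g.getD y [] := by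
      rw [PySem.Dict.getD_insert] at hp
      by_cases hcb : c' = c.2.1
      · rw [if_pos hcb] at hp
        rcases List.mem_append.1 hp with hp | hp
        · rw [PySem.Dict.getD_insert] at hp
          by_cases hba : c.2.1 = c.1
          · rw [if_pos hba] at hp
            rcases List.mem_append.1 hp with hp | hp
            · exact Or.inr (Or.inr ⟨c.1, hp⟩)
            · rw [List.mem_singleton] at hp; exact Or.inr (Or.inl hp)
          · rw [if_neg hba] at hp
            exact Or.inr (Or.inr ⟨c.2.1, hp⟩)
        · rw [List.mem_singleton] at hp; exact Or.inl hp
      · rw [if_neg hcb, PySem.Dict.getD_insert] at hp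
        by_cases hca : c' = c.1
        · rw [if_pos hca] at hp
          rcases List.mem_append.1 hp with hp | hp
          · exact Or.inr (Or.inr ⟨c.1, hp⟩)
          · rw [List.mem_singleton] at hp; exact Or.inr (Or.inl hp)
        · rw [if_neg hca] at hp
          exact Or.inr (Or.inr ⟨c', hp⟩)
    simp only [PySem.Dict.contains_insert]
    rcases hmem with rfl | rfl | ⟨y, hy⟩
    · simp
    · simp
    · rw [hP y p hy]
      simp
theorem seeds_eq {gr : PySem.Dict String (List (String × Int))} (hG : GoodG gr)
    (time : Int) (L : Nat) :
    ∀ (adj : List (String × Int)) (vA : PySem.Dict String Bool) (vB : PySem.Set String)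
      (r : List String),
      (∀ p ∈ adj, gr.contains p.1 = true) → RelV vA vB → vA.keys.Nodup →
      (∀ x, gr.contains x = true → vA.contains x = true) → muA vA ≤ L →
      RelV (adj.foldl (fun (s : PySem.Dict String Bool × List String) city =>
          if time - city.2 ≥ 0 then dfsA gr (L + 2) city (time - city.2 - 1) s.1 s.2 else s)
          (vA, r)).1
        (adj.foldl (fun (s : PySem.Set String × List String) nb =>
          if time - nb.2 < 0 then s
          else
            loopB gr
              (if time - nb.2 - 1 > 0 then
                 (gr.getD nb.1 []).reverse.foldl
                   (fun st p =>
                     if time - nb.2 - 1 - p.2 ≥ 0 then (p.1, time - nb.2 - 1 - p.2 - 1) :: st else st) []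
               else [])
              (PySem.Set.add s.1 nb.1) (s.2 ++ [nb.1])) (vB, r)).1 ∧
      (adj.foldl (fun (s : PySem.Dict String Bool × List String) city =>
          if time - city.2 ≥ 0 then dfsA gr (L + 2) city (time - city.2 - 1) s.1 s.2 else s)
          (vA, r)).2
        = (adj.foldl (fun (s : PySem.Set String × List String) nb =>
          if time - nb.2 < 0 then s
          else
            loopB gr
              (if time - nb.2 - 1 > 0 then
                 (gr.getD nb.1 []).reverse.foldl
                   (fun st p =>
                     if time - nb.2 - 1 - p.2 ≥ 0 then (p.1, time - nb.2 - 1 - p.2 - 1) :: st else st) []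
               else [])
              (PySem.Set.add s.1 nb.1) (s.2 ++ [nb.1])) (vB, r)).2 := by
  intro adj
  induction adj with
  | nil => intro vA vB r _ hrel _ _ _; exact ⟨hrel, rfl⟩
  | cons c t ih =>
    intro vA vB r hadj hrel hnd hk hmu
    simp only [List.foldl_cons]
    by_cases hskip : time - c.2 < 0
    · rw [if_neg (by omega), if_pos hskip]
      exact ih vA vB r (fun p hp => hadj p (List.mem_cons_of_mem _ hp)) hrel hnd hk hmu
    · rw [if_pos (by omega), if_neg hskip]
      have hgc : gr.contains c.1 = true := hadj c List.mem_cons_self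
      -- A side: unfold the dfs call into a fold over child frames
      have hA : dfsA gr (L + 2) c (time - c.2 - 1) vA r
          = (framesA (time - c.2 - 1) (gr.getD c.1 [])).foldl (stepA gr (L + 1))
              (vA.insert c.1 true, r ++ [c.1]) :=
        dfsA_unfold_frames gr (L + 1) c (time - c.2 - 1) vA r
      -- B side: the initial stack is the mapped child frames
      have hstack : (if time - c.2 - 1 > 0 then
             (gr.getD c.1 []).reverse.foldl
               (fun st p =>
                 if time - c.2 - 1 - p.2 ≥ 0 then (p.1, time - c.2 - 1 - p.2 - 1) :: st else st) []
           else [])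
          = (framesA (time - c.2 - 1) (gr.getD c.1 [])).map (fun fr => (fr.1.1, fr.2)) := by
        unfold framesA
        by_cases hrt : time - c.2 - 1 ≤ 0
        · rw [if_neg (by omega), if_pos hrt]
          rfl
        · rw [if_pos (by omega), if_neg hrt, pushfold_eq, List.append_nil, List.map_filterMap]
          apply List.filterMap_congr
          intro p _
          by_cases hge : time - c.2 - 1 - p.2 ≥ 0
          · rw [if_pos hge, if_pos hge]; rfl
          · rw [if_neg hge, if_neg hge]; rfl
      have hmain := loopB_eq_stepA hG (unvisB gr (PySem.Set.add vB c.1))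
        (framesA (time - c.2 - 1) (gr.getD c.1 [])) (vA.insert c.1 true)
        (PySem.Set.add vB c.1) (r ++ [c.1]) (L + 1) (le_refl _)
        (relV_insert_add hrel c.1)
        (keys_nodup_insert _ _ _ hnd)
        (fun x hx => (postV_insert_true vA c.1).2.1 x (hk x hx))
        (fun fr hm => hG c.1 fr.1 (mem_framesA hm))
        (by have := muA_insert_true_le vA c.1
            show muA (vA.insert c.1 true) + 1 ≤ L + 1
            omega)
      rw [hA, hstack]
      have hpost : PostV vA ((framesA (time - c.2 - 1) (gr.getD c.1 [])).foldl (stepA gr (L + 1))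
          (vA.insert c.1 true, r ++ [c.1])).1 :=
        postV_trans (postV_insert_true vA c.1)
          (frames_fold_post gr (L + 1) (framesA (time - c.2 - 1) (gr.getD c.1 [])) (vA.insert c.1 true, r ++ [c.1]))
      -- replace B's state pair by (its set, A's result list) using hmain.2
      rcases hmain with ⟨hmrel, hmres⟩
      rw [show (loopB gr ((framesA (time - c.2 - 1) (gr.getD c.1 [])).map (fun fr => (fr.1.1, fr.2)))
            (PySem.Set.add vB c.1) (r ++ [c.1]))
          = ((loopB gr ((framesA (time - c.2 - 1) (gr.getD c.1 [])).map (fun fr => (fr.1.1, fr.2)))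
            (PySem.Set.add vB c.1) (r ++ [c.1])).1,
             ((framesA (time - c.2 - 1) (gr.getD c.1 [])).foldl (stepA gr (L + 1))
              (vA.insert c.1 true, r ++ [c.1])).2) from by rw [← hmres]]
      rw [show ((framesA (time - c.2 - 1) (gr.getD c.1 [])).foldl (stepA gr (L + 1))
            (vA.insert c.1 true, r ++ [c.1]))
          = (((framesA (time - c.2 - 1) (gr.getD c.1 [])).foldl (stepA gr (L + 1))
            (vA.insert c.1 true, r ++ [c.1])).1,
             ((framesA (time - c.2 - 1) (gr.getD c.1 [])).foldl (stepA gr (L + 1))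
              (vA.insert c.1 true, r ++ [c.1])).2) from rfl]
      exact ih _ _ _ (fun p hp => hadj p (List.mem_cons_of_mem _ hp)) hmrel
        (hpost.2.2.2 hnd) (fun x hx => hpost.2.1 x (hk x hx))
        (le_trans hpost.2.2.1 hmu)
theorem relV_init (connections : List (String × String × Int)) (origin : String) :
    RelV ((buildVis connections).insert origin true) (PySem.Set.add PySem.Set.empty origin) := by
  intro x
  rw [PySem.Dict.getD_insert, contains_add_eq]
  by_cases hx : x = origin
  · simp [hx]
  · rw [if_neg hx, buildVis_getD]
    simp [PySem.Set.contains, PySem.Set.empty, hx]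

theorem vacationDestination_eq : ∀ (connections : List (String × String × Int)) (origin : String) (time : Int),
    vacationDestination connections origin time = vacationDestination_alt connections origin time := by
  intro connections origin time
  unfold vacationDestination vacationDestination_alt
  rw [PySem.List.foldl_prod_mk
    (f := fun (g : PySem.Dict String (List (String × Int))) (c : String × String × Int) =>
      (g.insert c.1 (g.getD c.1 [] ++ [(c.2.1, c.2.2)])).insert c.2.1
        ((g.insert c.1 (g.getD c.1 [] ++ [(c.2.1, c.2.2)])).getD c.2.1 [] ++ [(c.1, c.2.2)]))
    (g := fun (v : PySem.Dict String Bool) (c : String × String × Int) =>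
      (v.insert c.1 false).insert c.2.1 false)]
  show ((((buildG connections).getD origin []).foldl _ ((buildVis connections).insert origin true, [])).2 = _)
  have hG := goodG_buildG connections
  refine (seeds_eq hG time (2 * connections.length) ((buildG connections).getD origin [])
    ((buildVis connections).insert origin true) (PySem.Set.add PySem.Set.empty origin) []
    (fun p hp => hG origin p hp) (relV_init connections origin)
    (keys_nodup_insert _ _ _ (buildVis_nodup connections)) ?_ ?_).2
  · intro x hx
    rw [PySem.Dict.contains_insert]
    rw [contains_buildG_eq_buildVis] at hx
    simp [hx]
  · exact le_trans (muA_insert_true_le _ _)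
      (le_trans (muA_le_keys _) (buildVis_keys_len connections))

-- ===== VERDICT (by name: the statement is the Claim_ definition above) =====
theorem vacationDestination_spec : Claim_equal_vacationDestination := by
  unfold Claim_equal_vacationDestination
  intro connections origin time _ _
  unfold Spec_vacationDestination
  exact vacationDestination_eq connections origin time
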